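-- pv_equiv track=rewrite | github.com/dogwalkerg/baota-1 | panel/class/mailModel/base.py | _ipv6_to_ptr
-- ===== SOURCE A (Python) =====
-- def _ipv6_to_ptr(ipv6_address):
--
--     parts = ipv6_address.split(':')
--     normalized_parts = [part.zfill(4) for part in parts]
--     # 去掉冒号
--     normalized_address = ''.join(normalized_parts)
--     # 反转字符串
--     reversed_address = normalized_address[::-1]
--     # 加上点号
--     ptr_address_parts = list(reversed_address)
--     ptr_address = '.'.join(ptr_address_parts)
--     ptr_address += '.ip6.arpa'
--     # public.print_log("ptr_address  ^--{}".format(ptr_address))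
--
--     return ptr_address
-- ===== SOURCE B (Python) =====
-- def _ipv6_to_ptr(ipv6_address):
--     # Compute each nibble's destination slot directly: the PTR body is a
--     # fixed-size character buffer (nibble, '.', nibble, '.', ...) and the
--     # address is walked FORWARD, each character written straight into its
--     # final (descending) position -- no reversal, no intermediate string.
--     parts = ipv6_address.split(':')
--     k = sum(len(p) if len(p) > 4 else 4 for p in parts)
--     buf = ['.'] * (2 * k)
--     i = 2 * k - 2
--     for part in parts:
--         for ch in part.zfill(4):
--             buf[i] = ch
--             i -= 2
--     return ''.join(buf) + 'ip6.arpa'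
-- ===== Notes on version B (the rewrite author's own statement) =====
-- stated objective: alternative
-- what changed: B replaces A's build-join-then-reverse pipeline with direct index placement: it preallocates a dot-filled character buffer of the exact final size, walks the address forward writing each nibble straight into its final (descending, even) slot, and joins once; no string reversal, no intermediate joined string, no per-character list-of-strings.
import Mathlib
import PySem

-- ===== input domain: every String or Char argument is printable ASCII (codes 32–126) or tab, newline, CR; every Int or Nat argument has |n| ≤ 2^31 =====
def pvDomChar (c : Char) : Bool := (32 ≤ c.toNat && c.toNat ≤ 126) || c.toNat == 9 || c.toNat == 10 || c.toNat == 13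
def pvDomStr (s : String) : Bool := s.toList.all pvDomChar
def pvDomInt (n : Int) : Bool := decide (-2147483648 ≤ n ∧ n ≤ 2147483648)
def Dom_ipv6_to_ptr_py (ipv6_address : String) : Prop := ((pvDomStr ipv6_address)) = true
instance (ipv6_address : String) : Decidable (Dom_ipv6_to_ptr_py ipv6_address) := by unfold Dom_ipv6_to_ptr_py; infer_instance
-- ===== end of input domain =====

-- B writes each nibble straight into its final slot of a preallocated dot-filled buffer (forward scan, direct index placement) instead of A's join-then-reverse pipeline; objective: alternative, same O(n) cost.

-- ===== PORT A =====
def ipv6_to_ptr_py (ipv6_address : String) : String :=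
  let parts := (PySem.Str.split? ipv6_address ":").getD []          -- sep ":" ≠ "", so split? is some
  let normalized_parts := parts.map (fun part => PySem.Str.zfill part 4)
  let normalized_address := PySem.Str.join "" normalized_parts
  let reversed_address := (PySem.Str.slice? normalized_address none none (-1)).getD normalized_address
  let ptr_address_parts := reversed_address.toList.map (fun c => String.ofList [c])
  let ptr_address := PySem.Str.join "." ptr_address_parts
  ptr_address ++ ".ip6.arpa"

-- ===== PORT B =====
-- buf is a Python list of single-character strings, modelled as List Char; buf[i] = ch is
-- ported as List.set st.2.toNat ch — exact here because every executed write has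
-- 0 ≤ i < len(buf) (the loop writes exactly k slots, descending from 2*k-2 to 0),
-- and ''.join(buf) is String.ofList buf.
def ipv6_to_ptr_py_alt (ipv6_address : String) : String :=
  let parts := (PySem.Str.split? ipv6_address ":").getD []
  let k : Int := (parts.map (fun p => if PySem.Str.len p > 4 then PySem.Str.len p else 4)).sum
  let buf := List.replicate (2 * k).toNat '.'
  let st := parts.foldl
    (fun (st : List Char × Int) part =>
      (PySem.Str.zfill part 4).toList.foldl
        (fun (st : List Char × Int) ch => (st.1.set st.2.toNat ch, st.2 - 2)) st)
    (buf, 2 * k - 2)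
  String.ofList st.1 ++ "ip6.arpa"

-- ===== PRECONDITION & SPEC =====
def Spec_ipv6_to_ptr_py (ipv6_address : String) (out : String) : Prop := out = ipv6_to_ptr_py_alt ipv6_address
instance (ipv6_address : String) (out : String) : Decidable (Spec_ipv6_to_ptr_py ipv6_address out) := by unfold Spec_ipv6_to_ptr_py; infer_instance

-- ===== CLAIM =====
def Claim_equal_ipv6_to_ptr_py : Prop := ∀ (ipv6_address : String), Dom_ipv6_to_ptr_py ipv6_address → Spec_ipv6_to_ptr_py ipv6_address (ipv6_to_ptr_py ipv6_address)

-- ===== LEMMAS AND PROOFS =====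

-- splitOn's worker always returns at least one piece
theorem splitOn_go_ne_nil (sep : List Char) (fuel : Nat) :
    ∀ (l cur : List Char) (acc : List (List Char)),
      PySem.Chars.splitOn.go sep fuel l cur acc ≠ [] := by
  induction fuel with
  | zero => intro l cur acc; rw [PySem.Chars.splitOn.go]; simp
  | succ n ih =>
    intro l cur acc
    cases l with
    | nil => rw [PySem.Chars.splitOn.go]; simp; omega
    | cons c rest =>
      rw [PySem.Chars.splitOn.go]
      split_ifs with h
      · exact ih _ _ _
      · exact ih _ _ _

theorem splitOn_ne_nil (s sep : List Char) : PySem.Chars.splitOn s sep ≠ [] :=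
  splitOn_go_ne_nil sep (s.length + 1) s [] []

-- B's fill loop: walking L forward and writing into descending even slots of a
-- dot-filled buffer yields the reversed characters interleaved with dots
theorem fill_loop (L : List Char) :
    ∀ (tail : List Char),
      (L.foldl (fun (st : List Char × Int) ch => (st.1.set st.2.toNat ch, st.2 - 2))
        (List.replicate (2 * L.length) '.' ++ tail, 2 * (L.length : Int) - 2)).1
      = L.reverse.flatMap (fun c => [c, '.']) ++ tail := by
  induction L with
  | nil => intro tail; simp
  | cons c L ih =>
    intro tail
    have hidx : (2 * ((c :: L).length : Int) - 2).toNat = 2 * L.length := by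
      simp; omega
    have hbuf : (List.replicate (2 * (c :: L).length) '.' ++ tail).set (2 * L.length) c
        = List.replicate (2 * L.length) '.' ++ (c :: '.' :: tail) := by
      have h2 : 2 * (c :: L).length = 2 * L.length + 2 := by
        simp [List.length_cons]; ring
      have hrep : List.replicate (2 * (c :: L).length) '.'
          = List.replicate (2 * L.length) '.' ++ ['.', '.'] := by
        rw [h2, List.replicate_add]; rfl
      rw [hrep, List.append_assoc, List.set_append]
      simp
    have hstep : 2 * ((c :: L).length : Int) - 2 - 2 = 2 * (L.length : Int) - 2 := by
      simp; ring
    simp only [List.foldl_cons, hidx, hbuf, hstep, ih (c :: '.' :: tail)]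
    simp

-- the nibble count k is the length of the flattened zfilled address
theorem k_eq_length (ps : List String) :
    (ps.map (fun p => if PySem.Str.len p > 4 then PySem.Str.len p else 4)).sum
      = (((ps.map (fun p => (PySem.Str.zfill p 4).toList)).flatten).length : Int) := by
  induction ps with
  | nil => simp
  | cons p ps ih =>
    simp only [List.map_cons, List.sum_cons, List.flatten_cons, List.length_append]
    rw [ih]
    simp only [PySem.Str.toList_zfill, PySem.Chars.length_zfill, PySem.Str.len]
    split_ifs with h
    · push_cast at h ⊢; omega
    · push_cast at h ⊢; omega

-- dotted join of singletons, with a following '.', is flatMap (c ↦ [c, '.'])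
theorem dotjoin_eq_flatMap (c : Char) (l : List Char) :
    ∀ (s : List Char),
      PySem.Chars.join ['.'] ((c :: l).map (fun x => [x])) ++ '.' :: s
        = (c :: l).flatMap (fun x => [x, '.']) ++ s := by
  induction l generalizing c with
  | nil => intro s; simp [PySem.Chars.join_singleton]
  | cons d l ih =>
    intro s
    simp only [List.map_cons, PySem.Chars.join_cons_cons, List.flatMap_cons]
    have := ih d s
    simp only [List.map_cons] at this
    simp [this]

-- with an empty separator, join is concatenation
theorem join_nil_eq_flatten (css : List (List Char)) : PySem.Chars.join [] css = css.flatten := by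
  induction css with
  | nil => simp [PySem.Chars.join_nil]
  | cons c cs ih =>
    cases cs with
    | nil => simp [PySem.Chars.join_singleton]
    | cons d ds => simp [PySem.Chars.join_cons_cons] at ih ⊢; simpa using ih

-- ===== VERDICT =====
theorem ipv6_to_ptr_py_spec : Claim_equal_ipv6_to_ptr_py := by
  intro s _
  unfold Spec_ipv6_to_ptr_py ipv6_to_ptr_py ipv6_to_ptr_py_alt
  dsimp only
  apply String.ext
  set ps : List String := (PySem.Str.split? s ":").getD [] with hps
  set L : List Char := (ps.map (fun p => (PySem.Str.zfill p 4).toList)).flatten with hL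
  have hne : ps ≠ [] := by
    rw [hps]
    unfold PySem.Str.split? PySem.Chars.split?
    have h : (":".toList.isEmpty) = false := by decide
    rw [h]
    simp only [Bool.false_eq_true, if_false, Option.map_some, Option.getD_some, ne_eq,
      List.map_eq_nil_iff]
    exact splitOn_ne_nil _ _
  -- B side: the outer/inner folds are the fill loop over the flattened chars L
  have hk := k_eq_length ps
  have hB :
      (ps.foldl
        (fun (st : List Char × Int) part =>
          (PySem.Str.zfill part 4).toList.foldl
            (fun (st : List Char × Int) ch => (st.1.set st.2.toNat ch, st.2 - 2)) st)
        (List.replicate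
          (2 * (ps.map (fun p => if PySem.Str.len p > 4 then PySem.Str.len p else 4)).sum).toNat '.',
         2 * (ps.map (fun p => if PySem.Str.len p > 4 then PySem.Str.len p else 4)).sum - 2)).1
        = L.reverse.flatMap (fun c => [c, '.']) := by
    have hfold :
        ps.foldl
          (fun (st : List Char × Int) part =>
            (PySem.Str.zfill part 4).toList.foldl
              (fun (st : List Char × Int) ch => (st.1.set st.2.toNat ch, st.2 - 2)) st)
          (List.replicate (2 * L.length) '.', 2 * (L.length : Int) - 2)
        = L.foldl (fun (st : List Char × Int) ch => (st.1.set st.2.toNat ch, st.2 - 2))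
            (List.replicate (2 * L.length) '.', 2 * (L.length : Int) - 2) := by
      rw [hL, List.foldl_flatten, List.foldl_map]
    have hnat : (2 * (ps.map (fun p => if PySem.Str.len p > 4 then PySem.Str.len p else 4)).sum).toNat
        = 2 * L.length := by
      rw [hk, show (2 * ((L.length : Nat) : Int)) = (((2 * L.length : Nat) : Nat) : Int) by push_cast; ring]
      exact Int.toNat_natCast _
    have hfill := fill_loop L []
    simp only [List.append_nil] at hfill
    rw [hnat, hk, hfold, hfill]
  rw [hB]
  -- A side: join-then-reverse produces the same dotted reversed nibbles
  rw [PySem.Str.slice?_none_none_neg_one]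
  simp only [Option.getD_some, String.toList_append, PySem.Str.toList_join, List.map_map,
    Function.comp_def, String.toList_ofList, PySem.Str.toList_zfill]
  have hdot : ".ip6.arpa".toList = '.' :: "ip6.arpa".toList := by decide
  have hsep0 : ("".toList : List Char) = [] := by decide
  have hsep1 : (".".toList : List Char) = ['.'] := by decide
  rw [hsep0, hsep1, join_nil_eq_flatten]
  -- the reversed nibble list is nonempty: the first part zfills to ≥ 4 chars
  obtain ⟨p, ps', hpp⟩ := List.exists_cons_of_ne_nil hne
  have h4 : PySem.Chars.zfill p.toList 4 ≠ [] := by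
    have hlen := PySem.Chars.length_zfill p.toList 4
    intro h; rw [h] at hlen; simp at hlen; omega
  have hflat : (ps.map (fun p => PySem.Chars.zfill p.toList 4)).flatten ≠ [] := by
    rw [hpp]
    simp only [List.map_cons, List.flatten_cons, ne_eq, List.append_eq_nil_iff, not_and]
    intro h; exact absurd h h4
  have hrev : ((ps.map (fun p => PySem.Chars.zfill p.toList 4)).flatten).reverse ≠ [] := by
    simpa using hflat
  obtain ⟨c, l, hc⟩ := List.exists_cons_of_ne_nil hrev
  have hLrev : L.reverse = c :: l := by
    rw [hL]; simpa [PySem.Str.toList_zfill] using hc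
  rw [hc, hdot, hLrev]
  rw [dotjoin_eq_flatMap c l ("ip6.arpa".toList)]
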